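-- pv_equiv track=rewrite | github.com/volundmush/shinma | shinma/modules/core/mush/parser.py | identify_squares
-- ===== SOURCE A (Python) =====
-- from typing import List, Tuple
--
-- def identify_squares(text: str) -> List[Tuple[int, int]]:
--     escaped = False
--     idx = list()
--     depth = 0
--
--     for i, c in enumerate(text):
--         if escaped:
--             escaped = False
--         else:
--             if c == "[":
--                 if depth == 0:
--                     idx.append(i)
--                 depth += 1
--             elif c == "]" and depth > 0:
--                 depth -= 1
--                 if depth == 0:
--                     idx.append(i)
--             elif c == "\\":
--                 escaped = True
--             else:
--                 pass
--
--     # if it's not even, we don't count the unfinished square.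
--     if len(idx) % 2 == 1:
--         idx.pop()
--
--     it = iter(idx)
--     out = list()
--     for i in it:
--         out.append((i, next(it)))
--     return out
-- ===== SOURCE B (Python) =====
-- from typing import List, Tuple
--
-- def _find_open(text: str, i: int) -> int:
--     # skip forward to the next unescaped '[' (a backslash hides the next char)
--     n = len(text)
--     while i < n:
--         c = text[i]
--         if c == "[":
--             return i
--         i += 2 if c == "\\" else 1
--     return -1
--
-- def _find_close(text: str, i: int, depth: int) -> int:
--     # find the ']' matching the already-open bracket(s), skipping escaped chars
--     n = len(text)
--     while i < n:
--         c = text[i]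
--         if c == "\\":
--             i += 2
--             continue
--         if c == "[":
--             depth += 1
--         elif c == "]":
--             depth -= 1
--             if depth == 0:
--                 return i
--         i += 1
--     return -1
--
-- def identify_squares(text: str) -> List[Tuple[int, int]]:
--     # recursive-descent style skip-scan: locate an opener, then its matching
--     # closer, emit the pair and resume after it; no running escape/depth state
--     # threaded through one big loop, and an unclosed opener is simply not found.
--     out = []
--     i = 0
--     while True:
--         s = _find_open(text, i)
--         if s < 0:
--             return out
--         e = _find_close(text, s + 1, 1)
--         if e < 0:
--             return out
--         out.append((s, e))
--         i = e + 1
-- ===== Notes on version B (the rewrite author's own statement) =====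
-- stated objective: simpler
-- what changed: B is a skip-scan recursive descent: a _find_open helper jumps to the next unescaped top-level opener, a _find_close helper finds its matching closer, and the driver emits the pair and resumes after it, replacing A's single state-machine pass with escaped/depth state plus a parity-pop and a separate pairing loop.
import Mathlib
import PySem

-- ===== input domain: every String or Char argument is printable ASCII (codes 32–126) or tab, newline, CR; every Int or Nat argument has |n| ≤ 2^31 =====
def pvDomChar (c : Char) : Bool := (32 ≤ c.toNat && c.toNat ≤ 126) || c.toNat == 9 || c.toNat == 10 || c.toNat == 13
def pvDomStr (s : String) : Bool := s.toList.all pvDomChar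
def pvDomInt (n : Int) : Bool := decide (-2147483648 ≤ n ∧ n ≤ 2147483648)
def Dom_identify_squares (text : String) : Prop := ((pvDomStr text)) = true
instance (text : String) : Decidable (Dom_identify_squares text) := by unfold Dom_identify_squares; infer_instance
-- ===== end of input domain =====

-- B replaces A's one big state-machine scan plus parity-pop plus pairing pass with a skip-scan: find the next unescaped opener, then its matching closer, emit the pair and resume (simpler decomposition, same linear cost).


-- ===== PORT A =====
-- the scan loop: state (escaped, depth, idx)
def aLoop : List Char → Int → Bool → Int → List Int → List Int
  | [], _, _, _, idx => idx
  | c :: rest, i, escaped, depth, idx =>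
    if escaped then aLoop rest (i+1) false depth idx
    else if c = '[' then
      aLoop rest (i+1) false (depth+1) (if depth = 0 then idx ++ [i] else idx)
    else if c = ']' ∧ 0 < depth then
      aLoop rest (i+1) false (depth-1) (if depth - 1 = 0 then idx ++ [i] else idx)
    else if c = '\\' then aLoop rest (i+1) true depth idx
    else aLoop rest (i+1) false depth idx

-- "if len(idx) % 2 == 1: idx.pop()"
def popIfOdd (idx : List Int) : List Int :=
  if idx.length % 2 = 1 then idx.dropLast else idx

-- "for i in it: out.append((i, next(it)))"
def pairUp : List Int → List (Int × Int)
  | a :: b :: rest => (a, b) :: pairUp rest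
  | _ => []

def identify_squares (text : String) : List (Int × Int) :=
  pairUp (popIfOdd (aLoop text.toList 0 false 0 []))

-- ===== PORT B =====
-- _find_open: walk to the next unescaped '[' (a backslash hides the next char);
-- instead of Python's index-below-n test we recurse on the remaining char list,
-- returning the opener's index with the suffix after it (none = Python's -1)
def findOpen : List Char → Int → Option (Int × List Char)
  | [], _ => none
  | c :: rest, i =>
    if c = '[' then some (i, rest)
    else if c = '\\' then
      match rest with
      | [] => none
      | _ :: rest' => findOpen rest' (i+2)
    else findOpen rest (i+1)

-- _find_close: find the ']' matching the open bracket(s), skipping escaped chars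
def findClose : List Char → Int → Int → Option (Int × List Char)
  | [], _, _ => none
  | c :: rest, i, depth =>
    if c = '\\' then
      match rest with
      | [] => none
      | _ :: rest' => findClose rest' (i+2) depth
    else if c = '[' then findClose rest (i+1) (depth+1)
    else if c = ']' then
      if depth - 1 = 0 then some (i, rest)
      else findClose rest (i+1) (depth-1)
    else findClose rest (i+1) depth

theorem findOpen_len : ∀ (cs : List Char) (i : Int), ∀ (s : Int) (rest : List Char),
    findOpen cs i = some (s, rest) → rest.length < cs.length := by
  intro cs i
  induction cs, i using findOpen.induct with
  | case1 i => intro s rest h; rw [findOpen.eq_def] at h; simp at h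
  | case2 tl i => intro s rest h; rw [findOpen.eq_def] at h; simp at h; simp [h.2.symm]
  | case3 i h1 => intro s rest h; rw [findOpen.eq_def] at h; simp at h
  | case4 i d tl' h1 ih =>
    intro s rest h
    rw [findOpen.eq_def] at h; simp at h
    have := ih s rest h; simp; omega
  | case5 c tl i h1 h2 ih =>
    intro s rest h
    rw [findOpen.eq_def] at h; simp [h1, h2] at h
    have := ih s rest h; simp; omega

theorem findClose_len : ∀ (cs : List Char) (i d : Int), ∀ (e : Int) (rest : List Char),
    findClose cs i d = some (e, rest) → rest.length < cs.length := by
  intro cs i d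
  induction cs, i, d using findClose.induct with
  | case1 i d => intro e rest h; rw [findClose.eq_def] at h; simp at h
  | case2 i d => intro e rest h; rw [findClose.eq_def] at h; simp at h
  | case3 i d hd tl' ih =>
    intro e rest h
    rw [findClose.eq_def] at h; simp at h
    have := ih e rest h; simp; omega
  | case4 tl i d h1 ih =>
    intro e rest h
    rw [findClose.eq_def] at h; simp at h
    have := ih e rest h; simp; omega
  | case5 tl i d h1 h2 h3 =>
    intro e rest h
    rw [findClose.eq_def] at h; simp [h1] at h
    simp [h.2.symm]
  | case6 tl i d h1 h2 h3 ih =>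
    intro e rest h
    rw [findClose.eq_def] at h; simp [h1] at h
    have := ih e rest h; simp; omega
  | case7 c tl i d h1 h2 h3 ih =>
    intro e rest h
    rw [findClose.eq_def] at h; simp [h1, h2, h3] at h
    have := ih e rest h; simp; omega

-- the outer while-True loop of B's identify_squares
def bScan (cs : List Char) (i : Int) : List (Int × Int) :=
  match h1 : findOpen cs i with
  | none => []
  | some (s, rest1) =>
    match h2 : findClose rest1 (s+1) 1 with
    | none => []
    | some (e, rest2) => (s, e) :: bScan rest2 (e+1)
termination_by cs.length
decreasing_by
  exact Nat.lt_trans (findClose_len _ _ _ _ _ h2) (findOpen_len _ _ _ _ h1)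

def identify_squares_alt (text : String) : List (Int × Int) :=
  bScan text.toList 0

-- ===== PRECONDITION & SPEC =====
def Spec_identify_squares (text : String) (out : List (Int × Int)) : Prop := out = identify_squares_alt text
instance (text : String) (out : List (Int × Int)) : Decidable (Spec_identify_squares text out) := by unfold Spec_identify_squares; infer_instance

-- ===== CLAIM (what is proved, stated in full; the proofs are below) =====
def Claim_equal_identify_squares : Prop := ∀ (text : String), Dom_identify_squares text → Spec_identify_squares text (identify_squares text)

-- ===== LEMMAS AND PROOFS =====

-- flatten B's pairs back into A's flat index list
def flatP : List (Int × Int) → List Int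
  | [] => []
  | p :: rest => p.1 :: p.2 :: flatP rest

theorem flatP_append (xs ys : List (Int × Int)) : flatP (xs ++ ys) = flatP xs ++ flatP ys := by
  induction xs with
  | nil => rfl
  | cons p rest ih => simp [flatP, ih]

theorem flatP_length (xs : List (Int × Int)) : (flatP xs).length = 2 * xs.length := by
  induction xs with
  | nil => rfl
  | cons p rest ih => simp [flatP, ih]; ring

theorem pairUp_flatP (xs : List (Int × Int)) : pairUp (flatP xs) = xs := by
  induction xs with
  | nil => rfl
  | cons p rest ih => simp [flatP, pairUp, ih]

-- A's scan at depth 0 behaves like B's _find_open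
theorem aLoop_open : ∀ (cs : List Char) (i : Int), ∀ (idx : List Int),
    aLoop cs i false 0 idx =
      (match findOpen cs i with
       | none => idx
       | some (s, rest) => aLoop rest (s+1) false 1 (idx ++ [s])) := by
  intro cs i
  induction cs, i using findOpen.induct with
  | case1 i => intro idx; simp [aLoop, findOpen]
  | case2 tl i =>
    intro idx
    rw [findOpen.eq_def]; simp only [aLoop]; simp
  | case3 i h1 =>
    intro idx
    rw [findOpen.eq_def]; simp [aLoop]
  | case4 i d tl' h1 ih =>
    intro idx
    rw [findOpen.eq_def]; simp only [aLoop]; simp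
    rw [show i + 1 + 1 = i + 2 by ring]
    exact ih idx
  | case5 c tl i h1 h2 ih =>
    intro idx
    rw [findOpen.eq_def]; simp only [aLoop]
    simp [h1, h2]
    exact ih idx

-- A's scan at depth d ≥ 1 behaves like B's _find_close
theorem aLoop_close : ∀ (cs : List Char) (i d : Int), 1 ≤ d → ∀ (idx : List Int),
    aLoop cs i false d idx =
      (match findClose cs i d with
       | none => idx
       | some (e, rest) => aLoop rest (e+1) false 0 (idx ++ [e])) := by
  intro cs i d
  induction cs, i, d using findClose.induct with
  | case1 i d => intro hd idx; simp [aLoop, findClose]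
  | case2 i d => intro hd idx; rw [findClose.eq_def]; simp [aLoop]
  | case3 i d hd0 tl' ih =>
    intro hd idx
    rw [findClose.eq_def]; simp only [aLoop]; simp
    rw [show i + 1 + 1 = i + 2 by ring]
    exact ih hd idx
  | case4 tl i d h1 ih =>
    intro hd idx
    rw [findClose.eq_def]; simp only [aLoop]
    simp [show d ≠ 0 by omega]
    exact ih (by omega) idx
  | case5 tl i d h1 h2 h3 =>
    intro hd idx
    rw [findClose.eq_def]; simp only [aLoop]
    simp [h1, show 0 < d by omega]
  | case6 tl i d h1 h2 h3 ih =>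
    intro hd idx
    rw [findClose.eq_def]; simp only [aLoop]
    simp [h1, show 0 < d by omega]
    exact ih (by omega) idx
  | case7 c tl i d h1 h2 h3 ih =>
    intro hd idx
    rw [findClose.eq_def]; simp only [aLoop]
    simp [h1, h2, h3]
    exact ih hd idx

theorem bScan_eq_none (cs : List Char) (i : Int) (h1 : findOpen cs i = none) :
    bScan cs i = [] := by
  rw [bScan.eq_def]; split <;> simp_all

theorem bScan_eq_noclose (cs : List Char) (i s : Int) (rest1 : List Char)
    (h1 : findOpen cs i = some (s, rest1)) (h2 : findClose rest1 (s+1) 1 = none) :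
    bScan cs i = [] := by
  rw [bScan.eq_def]; split <;> simp_all
  split <;> simp_all

theorem bScan_eq_cons (cs : List Char) (i s e : Int) (rest1 rest2 : List Char)
    (h1 : findOpen cs i = some (s, rest1)) (h2 : findClose rest1 (s+1) 1 = some (e, rest2)) :
    bScan cs i = (s, e) :: bScan rest2 (e+1) := by
  rw [bScan.eq_def]; split <;> simp_all
  split <;> simp_all

theorem key : ∀ (cs : List Char) (i : Int), ∀ (out : List (Int × Int)),
    pairUp (popIfOdd (aLoop cs i false 0 (flatP out))) = out ++ bScan cs i := by
  intro cs i
  induction cs, i using bScan.induct with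
  | case1 cs i h1 =>
    intro out
    rw [bScan_eq_none cs i h1]
    rw [aLoop_open, h1]
    have : ¬ (flatP out).length % 2 = 1 := by simp [flatP_length]
    simp [popIfOdd, this, pairUp_flatP]
  | case2 cs i s rest1 h1 h2 =>
    intro out
    rw [bScan_eq_noclose cs i s rest1 h1 h2]
    rw [aLoop_open, h1]
    simp only []
    rw [aLoop_close rest1 (s+1) 1 (by norm_num), h2]
    have hc : ((flatP out).length + 1) % 2 = 1 := by
      have := flatP_length out; omega
    simp [popIfOdd, hc, pairUp_flatP]
  | case3 cs i s rest1 h1 e rest2 h2 ih =>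
    intro out
    rw [bScan_eq_cons cs i s e rest1 rest2 h1 h2]
    rw [aLoop_open, h1]
    simp only []
    rw [aLoop_close rest1 (s+1) 1 (by norm_num), h2]
    simp only []
    have h4 : flatP out ++ [s] ++ [e] = flatP (out ++ [(s, e)]) := by
      simp [flatP_append, flatP]
    rw [List.append_assoc, show [s] ++ [e] = [s, e] from rfl, ← show flatP [(s,e)] = [s, e] from rfl,
      ← flatP_append]
    rw [ih (out ++ [(s, e)])]
    simp

-- ===== VERDICT (by name: the statement is the Claim_ definition above) =====
theorem identify_squares_spec : Claim_equal_identify_squares := by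
  intro text _
  unfold Spec_identify_squares identify_squares identify_squares_alt
  have := key text.toList 0 []
  simpa [flatP] using this
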